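-- pv_equiv track=rewrite | github.com/chuckie-xch/py-quickstart | leetcode/daily/year25/m04/day08.py | minimumOperation
-- ===== SOURCE A (Python) =====
-- from typing import List
--
-- def minimumOperation(nums: List[int]) -> int:
--     seen = set()
--     for i in range(len(nums) - 1, -1, -1):
--         x = nums[i]
--         if x in seen:
--             return i // 3 + 1
--         seen.add(x)
--     return 0
-- ===== SOURCE B (Python) =====
-- from typing import List
--
-- def minimumOperation(nums: List[int]) -> int:
--     last_seen = {}
--     best = -1
--     for j, x in enumerate(nums):
--         if x in last_seen:
--             best = max(best, last_seen[x])
--         last_seen[x] = j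
--     return 0 if best == -1 else best // 3 + 1
-- ===== Notes on version B (the rewrite author's own statement) =====
-- stated objective: alternative
-- what changed: Replaces A's backward scan with early return on the first value already seen in a set by a single forward pass that keeps a dict mapping each value to its last index and a running maximum duplicate index, converting to the answer only at the end.
import Mathlib
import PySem

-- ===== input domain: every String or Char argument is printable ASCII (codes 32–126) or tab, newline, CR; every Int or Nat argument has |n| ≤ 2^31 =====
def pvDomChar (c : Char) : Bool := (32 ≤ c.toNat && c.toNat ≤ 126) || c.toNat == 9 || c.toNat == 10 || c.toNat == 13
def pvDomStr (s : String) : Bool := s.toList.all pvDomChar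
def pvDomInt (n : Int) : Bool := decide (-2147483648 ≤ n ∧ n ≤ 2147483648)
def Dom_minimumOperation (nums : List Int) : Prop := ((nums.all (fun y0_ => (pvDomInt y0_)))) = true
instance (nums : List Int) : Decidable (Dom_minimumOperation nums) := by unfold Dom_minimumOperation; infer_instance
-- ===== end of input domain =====

-- B replaces A's backward scan with early return by a single forward pass that keeps,
-- in a dict, the last index seen for each value and a running maximum duplicate index
-- (objective: alternative decomposition, same O(n) cost).

-- ===== PORT A =====
-- loop 'for i in range(len(nums)-1, -1, -1)': structural recursion on i+1;
-- nums[i] is always in range here, so List.getD is exact.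
def minimumOperation.aGo (nums : List Int) : Nat → PySem.Set Int → Int
  | 0, _ => 0
  | k + 1, seen =>
    let x := nums.getD k 0
    if PySem.Set.contains seen x then PySem.Int.floordiv (k : Int) 3 + 1
    else minimumOperation.aGo nums k (PySem.Set.add seen x)

def minimumOperation (nums : List Int) : Int :=
  minimumOperation.aGo nums nums.length PySem.Set.empty

-- ===== PORT B =====
def minimumOperation_alt (nums : List Int) : Int :=
  let st :=
    (PySem.List.enumerate nums 0).foldl
      (fun (st : PySem.Dict Int Int × Int) (jx : Int × Int) =>
        let best := if st.1.contains jx.2 then max st.2 (st.1.getD jx.2 0) else st.2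
        (st.1.insert jx.2 jx.1, best))
      (PySem.Dict.empty, -1)
  if st.2 = -1 then 0 else PySem.Int.floordiv st.2 3 + 1

-- ===== PRECONDITION & SPEC =====
def Spec_minimumOperation (nums : List Int) (out : Int) : Prop := out = minimumOperation_alt nums
instance (nums : List Int) (out : Int) : Decidable (Spec_minimumOperation nums out) := by unfold Spec_minimumOperation; infer_instance

-- ===== CLAIM (what is proved, stated in full; the proofs are below) =====
def Claim_equal_minimumOperation : Prop := ∀ (nums : List Int), Dom_minimumOperation nums → Spec_minimumOperation nums (minimumOperation nums)

-- ===== LEMMAS AND PROOFS =====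

-- greatest index k < m whose value reappears later in nums, else -1 (A's search order)
def bestU (nums : List Int) : Nat → Int
  | 0 => -1
  | k + 1 =>
    if (nums.drop (k + 1)).contains (nums.getD k 0) then (k : Int) else bestU nums k

-- last index k < m with nums.getD k 0 = v, else -1
def loBelow (nums : List Int) (v : Int) : Nat → Int
  | 0 => -1
  | k + 1 => if nums.getD k 0 = v then (k : Int) else loBelow nums v k

theorem bestU_le (nums : List Int) (m : Nat) : bestU nums m ≤ (m : Int) - 1 := by
  induction m with
  | zero => simp [bestU]
  | succ k ih =>
    simp only [bestU]
    split
    · push_cast; omega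
    · omega

theorem loBelow_le (nums : List Int) (v : Int) (m : Nat) :
    loBelow nums v m ≤ (m : Int) - 1 := by
  induction m with
  | zero => simp [loBelow]
  | succ k ih =>
    simp only [loBelow]
    split
    · push_cast; omega
    · omega

theorem neg_one_le_bestU (nums : List Int) (m : Nat) : -1 ≤ bestU nums m := by
  induction m with
  | zero => simp [bestU]
  | succ k ih =>
    simp only [bestU]
    split
    · omega
    · exact ih

theorem loBelow_eq_neg_one_of_not_mem (nums : List Int) (v : Int) (m : Nat)
    (hm : m ≤ nums.length) (hv : v ∉ nums) : loBelow nums v m = -1 := by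
  induction m with
  | zero => simp [loBelow]
  | succ k ih =>
    simp only [loBelow]
    rw [if_neg, ih (by omega)]
    intro h
    rw [List.getD_eq_getElem nums 0 (by omega)] at h
    exact hv (h ▸ List.getElem_mem _)

theorem loBelow_append (nums : List Int) (x v : Int) (m : Nat) (hm : m ≤ nums.length) :
    loBelow (nums ++ [x]) v m = loBelow nums v m := by
  induction m with
  | zero => rfl
  | succ k ih =>
    simp only [loBelow]
    rw [List.getD_append nums [x] 0 k (by omega), ih (by omega)]

-- appending one element on the right: the best duplicate index becomes a max
theorem bestU_append (nums : List Int) (x : Int) (m : Nat) (hm : m ≤ nums.length) :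
    bestU (nums ++ [x]) m = max (bestU nums m) (loBelow nums x m) := by
  induction m with
  | zero => simp [bestU, loBelow]
  | succ k ih =>
    have hk : k < nums.length := by omega
    have hget : (nums ++ [x]).getD k 0 = nums.getD k 0 := List.getD_append nums [x] 0 k hk
    have hdrop : List.drop (k + 1) (nums ++ [x]) = List.drop (k + 1) nums ++ [x] :=
      List.drop_append_of_le_length (by omega)
    simp only [bestU, loBelow, hget, hdrop, List.contains_append, List.contains_cons,
      List.contains_nil, Bool.or_false, beq_iff_eq, Bool.or_eq_true]
    by_cases hdup : (List.drop (k + 1) nums).contains (nums.getD k 0) = true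
    · rw [if_pos (Or.inl hdup), if_pos hdup]
      have hlb := loBelow_le nums x k
      split <;> omega
    · by_cases hx : nums.getD k 0 = x
      · rw [if_pos (Or.inr hx), if_neg hdup, if_pos hx]
        have := bestU_le nums k
        omega
      · rw [if_neg (by tauto), if_neg hdup, if_neg hx]
        exact ih (by omega)

-- A's loop computes bestU, given that 'seen' holds exactly the elements of the suffix
theorem aGo_eq (nums : List Int) (m : Nat) (seen : PySem.Set Int)
    (hm : m ≤ nums.length)
    (hseen : ∀ y, PySem.Set.contains seen y = true ↔ y ∈ nums.drop m) :
    minimumOperation.aGo nums m seen =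
      (if bestU nums m = -1 then 0 else PySem.Int.floordiv (bestU nums m) 3 + 1) := by
  induction m generalizing seen with
  | zero => simp [minimumOperation.aGo, bestU]
  | succ k ih =>
    have hk : k < nums.length := by omega
    have hdropk : nums.drop k = nums.getD k 0 :: nums.drop (k + 1) := by
      rw [List.drop_eq_getElem_cons hk, List.getD_eq_getElem nums 0 hk]
    by_cases hmem : nums.getD k 0 ∈ nums.drop (k + 1)
    · have hbU : bestU nums (k + 1) = (k : Int) := by
        simp only [bestU]
        rw [if_pos (List.contains_iff_mem.mpr hmem)]
      have hs : PySem.Set.contains seen (nums.getD k 0) = true := (hseen _).mpr hmem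
      simp only [minimumOperation.aGo]
      rw [if_pos hs, hbU, if_neg (by omega)]
    · have hbU : bestU nums (k + 1) = bestU nums k := by
        simp only [bestU]
        rw [if_neg (fun h => hmem (List.contains_iff_mem.mp h))]
      have hs : ¬ PySem.Set.contains seen (nums.getD k 0) = true :=
        fun h => hmem ((hseen _).mp h)
      simp only [minimumOperation.aGo]
      rw [if_neg hs, hbU]
      refine ih _ (by omega) ?_
      intro y
      rw [PySem.Set.contains_iff, PySem.Set.mem_add, hdropk, List.mem_cons, ← hseen y,
        PySem.Set.contains_iff]
      tauto

-- B's fold invariant, by induction appending on the right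
theorem bFold_eq (nums : List Int) :
    (∀ v, ((PySem.List.enumerate nums 0).foldl
        (fun (st : PySem.Dict Int Int × Int) (jx : Int × Int) =>
          let best := if st.1.contains jx.2 then max st.2 (st.1.getD jx.2 0) else st.2
          (st.1.insert jx.2 jx.1, best))
        (PySem.Dict.empty, -1)).1.contains v = decide (v ∈ nums)) ∧
    (∀ v, v ∈ nums → ((PySem.List.enumerate nums 0).foldl
        (fun (st : PySem.Dict Int Int × Int) (jx : Int × Int) =>
          let best := if st.1.contains jx.2 then max st.2 (st.1.getD jx.2 0) else st.2
          (st.1.insert jx.2 jx.1, best))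
        (PySem.Dict.empty, -1)).1.getD v 0 = loBelow nums v nums.length) ∧
    ((PySem.List.enumerate nums 0).foldl
        (fun (st : PySem.Dict Int Int × Int) (jx : Int × Int) =>
          let best := if st.1.contains jx.2 then max st.2 (st.1.getD jx.2 0) else st.2
          (st.1.insert jx.2 jx.1, best))
        (PySem.Dict.empty, -1)).2 = bestU nums nums.length := by
  induction nums using List.reverseRecOn with
  | nil =>
    refine ⟨by simp [PySem.List.enumerate], by simp, by simp [PySem.List.enumerate, bestU]⟩
  | append_singleton xs x ih =>
    obtain ⟨ihc, ihd, ihb⟩ := ih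
    have hlen2 : (xs ++ [x]).length = xs.length + 1 := by simp
    rw [PySem.List.enumerate_append]
    simp only [List.foldl_append, PySem.List.enumerate_cons, PySem.List.enumerate_nil,
      List.foldl_cons, List.foldl_nil]
    refine ⟨?_, ?_, ?_⟩
    · intro v
      rw [PySem.Dict.contains_insert, ihc]
      by_cases h : v = x <;> simp [List.mem_append, h, beq_iff_eq]
    · intro v hv
      rw [PySem.Dict.getD_insert]
      have htop : loBelow (xs ++ [x]) v (xs.length + 1) =
          if x = v then (xs.length : Int) else loBelow xs v xs.length := by
        simp only [loBelow]
        rw [List.getD_append_right xs [x] 0 xs.length (le_refl _)]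
        simp only [Nat.sub_self, List.getD, List.getElem?_cons_zero, Option.getD_some]
        rw [loBelow_append xs x v xs.length (le_refl _)]
      rw [hlen2, htop]
      by_cases hvx : v = x
      · rw [if_pos hvx, if_pos hvx.symm]
        simp
      · rw [if_neg hvx, if_neg (fun h => hvx h.symm)]
        have hvxs : v ∈ xs := by
          rcases List.mem_append.mp hv with h | h
          · exact h
          · exact absurd (List.mem_singleton.mp h) hvx
        exact ihd v hvxs
    · have htop : bestU (xs ++ [x]) (xs.length + 1) = bestU (xs ++ [x]) xs.length := by
        simp only [bestU]
        rw [if_neg (by simp)]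
      rw [hlen2, htop, bestU_append xs x xs.length (le_refl _), ihc, ihb]
      by_cases hx : x ∈ xs
      · rw [if_pos (by simp [hx]), ihd x hx]
      · rw [if_neg (by simp [hx]),
          loBelow_eq_neg_one_of_not_mem xs x xs.length (le_refl _) hx]
        have := neg_one_le_bestU xs xs.length
        omega

-- ===== VERDICT (by name: the statement is the Claim_ definition above) =====
theorem minimumOperation_spec : Claim_equal_minimumOperation := by
  intro nums _
  show minimumOperation nums = minimumOperation_alt nums
  rw [minimumOperation, aGo_eq nums nums.length PySem.Set.empty (le_refl _)
    (by intro y; simp [PySem.Set.empty])]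
  rw [minimumOperation_alt]
  simp only [(bFold_eq nums).2.2]
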